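-- pv_equiv track=rewrite | github.com/eugenepyvovarov/mini-apps-skills-marketplace | site-expiry-monitor/scripts/site_expiry_monitor.py | public_suffix
-- ===== SOURCE A (Python) =====
-- from typing import Any, Dict, Iterable, List, Optional, Sequence, Tuple
--
-- def public_suffix(domain: str, rules: Tuple[set[str], set[str], set[str]]) -> str:
--     exact, wildcard, exceptions = rules
--     labels = [p for p in domain.split(".") if p]
--     if not labels:
--         return domain
--
--     best: Optional[str] = None
--     best_len = 0
--     for i in range(len(labels)):
--         candidate = ".".join(labels[i:])
--         if candidate in exceptions:
--             return ".".join(labels[i + 1 :]) if (i + 1) < len(labels) else candidate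
--
--         if candidate in exact:
--             n = len(labels) - i
--             if n > best_len:
--                 best = candidate
--                 best_len = n
--
--         if (i + 1) < len(labels):
--             wc_base = ".".join(labels[i + 1 :])
--             if wc_base in wildcard:
--                 n = len(labels) - i
--                 if n > best_len:
--                     best = candidate
--                     best_len = n
--
--     if best:
--         return best
--     return labels[-1]
-- ===== SOURCE B (Python) =====
-- def public_suffix(domain, rules):
--     exact, wildcard, exceptions = rules
--     labels = [p for p in domain.split(".") if p]
--     if not labels:
--         return domain
--     n = len(labels)
--     suffixes = [".".join(labels[i:]) for i in range(n)]
--     # phase 1: an exception rule short-circuits everything; the longest one is the first index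
--     for i, s in enumerate(suffixes):
--         if s in exceptions:
--             return suffixes[i + 1] if i + 1 < n else s
--     # phase 2: longest suffix matching an exact rule or whose parent matches a wildcard rule
--     for i, s in enumerate(suffixes):
--         if s in exact or (i + 1 < n and suffixes[i + 1] in wildcard):
--             return s
--     return labels[-1]
-- ===== Notes on version B (the rewrite author's own statement) =====
-- stated objective: alternative
-- what changed: B precomputes the list of suffixes once and replaces A's single interleaved scan with a running best/best_len accumulator by two ordered first-match passes: an exception-detection pass, then a match-selection pass (first = longest), with no accumulator state.
import Mathlib
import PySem

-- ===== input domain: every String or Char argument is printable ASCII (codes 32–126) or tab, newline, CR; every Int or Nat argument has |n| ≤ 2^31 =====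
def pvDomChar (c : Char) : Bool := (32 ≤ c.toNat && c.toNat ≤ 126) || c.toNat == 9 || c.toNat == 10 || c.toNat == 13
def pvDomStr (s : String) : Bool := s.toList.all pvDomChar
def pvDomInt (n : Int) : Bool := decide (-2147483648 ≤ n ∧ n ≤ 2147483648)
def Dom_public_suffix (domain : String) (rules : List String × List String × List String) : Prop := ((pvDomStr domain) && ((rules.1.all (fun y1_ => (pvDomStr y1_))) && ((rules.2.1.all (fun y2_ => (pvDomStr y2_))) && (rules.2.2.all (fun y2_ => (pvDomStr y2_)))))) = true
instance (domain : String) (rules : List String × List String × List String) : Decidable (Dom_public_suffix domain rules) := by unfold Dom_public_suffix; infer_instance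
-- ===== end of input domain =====

-- B is an alternative decomposition: suffixes precomputed once, then two ordered first-match
-- passes (exceptions, then exact/wildcard matches) instead of A's interleaved best/best_len scan.

-- ===== PORT A =====
-- the `for i in range(len(labels))` loop of A, with its early returns and best/best_len state
def pubLoopA (labels exact wildcard exceptions : List String) (i : Nat)
    (best : Option String) (bestLen : Int) : String :=
  if _h : i < labels.length then
    let candidate := PySem.Str.join "." (PySem.List.slice labels (some (i : Int)))
    if PySem.Set.contains exceptions candidate then
      (if i + 1 < labels.length then PySem.Str.join "." (PySem.List.slice labels (some ((i : Int) + 1))) else candidate)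
    else
      -- `if candidate in exact: n = …; if n > best_len: …`
      let s1 := if PySem.Set.contains exact candidate && decide (((labels.length : Int) - i) > bestLen)
                then (some candidate, ((labels.length : Int) - i)) else (best, bestLen)
      -- `if (i+1) < len(labels): wc_base = …; if wc_base in wildcard: if n > best_len: …`
      let s2 := if decide (i + 1 < labels.length)
                   && PySem.Set.contains wildcard (PySem.Str.join "." (PySem.List.slice labels (some ((i : Int) + 1))))
                   && decide (((labels.length : Int) - i) > s1.2)
                then (some candidate, ((labels.length : Int) - i)) else s1
      pubLoopA labels exact wildcard exceptions (i + 1) s2.1 s2.2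
  else
    -- `if best: return best` (truthiness: non-None and non-empty), `return labels[-1]`
    match best with
    | some b => if b ≠ "" then b else (PySem.List.pyGet? labels (-1)).getD ""
    | none => (PySem.List.pyGet? labels (-1)).getD ""
termination_by labels.length - i

def public_suffix (domain : String) (rules : List String × List String × List String) : String :=
  let exact := rules.1
  let wildcard := rules.2.1
  let exceptions := rules.2.2
  -- `labels = [p for p in domain.split(".") if p]`; "." ≠ "" so split? is always `some`
  let labels := ((PySem.Str.split? domain ".").getD []).filter (fun p => decide (p ≠ ""))
  if labels = [] then domain
  else pubLoopA labels exact wildcard exceptions 0 none 0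

-- ===== PORT B =====
def public_suffix_alt (domain : String) (rules : List String × List String × List String) : String :=
  let exact := rules.1
  let wildcard := rules.2.1
  let exceptions := rules.2.2
  let labels := ((PySem.Str.split? domain ".").getD []).filter (fun p => decide (p ≠ ""))
  if labels = [] then domain
  else
    let n := labels.length
    let suffixes := (List.range n).map (fun (i : Nat) => PySem.Str.join "." (PySem.List.slice labels (some (i : Int))))
    -- first pass: `for i, s in enumerate(suffixes): if s in exceptions: return …`
    match (PySem.List.enumerate suffixes).find? (fun p => PySem.Set.contains exceptions p.2) with
    | some (i, s) =>
        if i + 1 < (n : Int) then (PySem.List.pyGet? suffixes (i + 1)).getD "" else s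
    | none =>
      -- second pass: `if s in exact or (i+1 < n and suffixes[i+1] in wildcard): return s`
      -- (the pyGet? is guarded by `i+1 < n`, so the `.getD ""` default is never the result)
      match (PySem.List.enumerate suffixes).find?
          (fun p => PySem.Set.contains exact p.2
            || (decide (p.1 + 1 < (n : Int))
                && PySem.Set.contains wildcard ((PySem.List.pyGet? suffixes (p.1 + 1)).getD ""))) with
      | some (_, s) => s
      | none => (PySem.List.pyGet? labels (-1)).getD ""

-- ===== PRECONDITION & SPEC =====
def Spec_public_suffix (domain : String) (rules : List String × List String × List String) (out : String) : Prop := out = public_suffix_alt domain rules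
instance (domain : String) (rules : List String × List String × List String) (out : String) : Decidable (Spec_public_suffix domain rules out) := by unfold Spec_public_suffix; infer_instance

-- ===== CLAIM (what is proved, stated in full; the proofs are below) =====
def Claim_equal_public_suffix : Prop := ∀ (domain : String) (rules : List String × List String × List String), Dom_public_suffix domain rules → Spec_public_suffix domain rules (public_suffix domain rules)

-- ===== LEMMAS AND PROOFS =====

-- fuel-indexed first-index-satisfying-p scanner, the common reference for both ports
def scanP (p : Nat → Bool) (i k : Nat) : Option Nat :=
  match k with
  | 0 => none
  | k + 1 => if p i then some i else scanP p (i + 1) k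

theorem scanP_congr (p q : Nat → Bool) (i k : Nat)
    (h : ∀ j, i ≤ j → j < i + k → p j = q j) : scanP p i k = scanP q i k := by
  induction k generalizing i with
  | zero => rfl
  | succ k ih =>
    simp only [scanP, h i (le_refl i) (by omega)]
    split
    · rfl
    · exact ih (i + 1) (fun j h1 h2 => h j (by omega) (by omega))

-- elements of labels are nonempty, hence every suffix join is nonempty
theorem join_ne_empty (l : List String) (hne : l ≠ []) (hall : ∀ x ∈ l, x ≠ "") :
    PySem.Str.join "." l ≠ "" := by
  intro h
  have htl := congrArg String.toList h
  rw [PySem.Str.toList_join] at htl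
  match l, hne with
  | [x], _ =>
    simp only [List.map, PySem.Chars.join_singleton] at htl
    exact hall x (by simp) (by have := congrArg String.ofList htl; simpa using this)
  | x :: y :: rest, _ =>
    simp only [List.map, PySem.Chars.join_cons_cons] at htl
    have hx : x.toList = [] := by
      have := List.append_eq_nil_iff.mp (List.append_eq_nil_iff.mp htl).1
      exact this.1
    exact hall x (by simp) (by have := congrArg String.ofList hx; simpa using this)

-- abbreviation for the proofs: the i-th suffix
def suf (labels : List String) (i : Nat) : String :=
  PySem.Str.join "." (PySem.List.slice labels (some (i : Int)))

theorem suf_eq_drop (labels : List String) (i : Nat) :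
    suf labels i = PySem.Str.join "." (labels.drop i) := by
  unfold suf
  rw [PySem.List.slice_from labels (by positivity)]
  simp

theorem suf_ne_empty (labels : List String) (hall : ∀ x ∈ labels, x ≠ "") (i : Nat)
    (hi : i < labels.length) : suf labels i ≠ "" := by
  rw [suf_eq_drop]
  refine join_ne_empty _ (by simp; omega) ?_
  intro x hx
  exact hall x (List.mem_of_mem_drop hx)

-- the value A and B return when the first exception sits at index j
def excVal (labels : List String) (j : Nat) : String :=
  if j + 1 < labels.length then suf labels (j + 1) else suf labels j

-- A's loop in the "locked" state: best is set and bestLen dominates all remaining lengths,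
-- so only the exception check can still change the result
theorem pubLoopA_locked (labels exact wildcard exceptions : List String)
    (k i : Nat) (hk : i + k = labels.length) (b : String) (hb : b ≠ "") (bl : Int)
    (hbl : (labels.length : Int) - i ≤ bl) :
    pubLoopA labels exact wildcard exceptions i (some b) bl =
      match scanP (fun j => PySem.Set.contains exceptions (suf labels j)) i k with
      | some j => excVal labels j
      | none => b := by
  induction k generalizing i bl with
  | zero =>
    rw [pubLoopA]
    simp only [scanP]
    rw [dif_neg (by omega)]
    simp [hb]
  | succ k ih =>
    rw [pubLoopA]
    rw [dif_pos (by omega)]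
    simp only [scanP, suf, excVal]
    push_cast
    by_cases hexc : PySem.Set.contains exceptions (PySem.Str.join "." (PySem.List.slice labels (some (i : Int)))) = true
    · simp only [hexc, if_true]
    · simp only [hexc, if_false, Bool.false_eq_true]
      have hlen : decide (((labels.length : Int) - i) > bl) = false := by
        simp only [decide_eq_false_iff_not]; omega
      simp only [hlen, Bool.and_false, if_neg (Bool.false_ne_true)]
      rw [ih (i + 1) (by omega) bl (by push_cast; omega)]
      simp only [suf, excVal]
      push_cast
      rfl

-- the match predicate of phase 2
def matchP (labels exact wildcard : List String) (j : Nat) : Bool :=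
  PySem.Set.contains exact (suf labels j)
    || (decide (j + 1 < labels.length) && PySem.Set.contains wildcard (suf labels (j + 1)))

-- A's loop from a fresh state computes: first exception wins, else first (= longest) match, else labels[-1]
theorem pubLoopA_fresh (labels exact wildcard exceptions : List String)
    (hall : ∀ x ∈ labels, x ≠ "")
    (k i : Nat) (hk : i + k = labels.length) :
    pubLoopA labels exact wildcard exceptions i none 0 =
      match scanP (fun j => PySem.Set.contains exceptions (suf labels j)) i k with
      | some j => excVal labels j
      | none =>
        match scanP (matchP labels exact wildcard) i k with
        | some m => suf labels m
        | none => (PySem.List.pyGet? labels (-1)).getD "" := by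
  induction k generalizing i with
  | zero =>
    rw [pubLoopA]
    simp only [scanP]
    rw [dif_neg (by omega)]
  | succ k ih =>
    rw [pubLoopA]
    rw [dif_pos (by omega)]
    simp only [scanP, matchP, suf, excVal]
    push_cast
    by_cases hexc : PySem.Set.contains exceptions (PySem.Str.join "." (PySem.List.slice labels (some (i : Int)))) = true
    · simp only [hexc, if_true]
    · simp only [hexc, if_false, Bool.false_eq_true]
      have hipos : decide (((labels.length : Int) - i) > (0 : Int)) = true := by
        simp only [decide_eq_true_eq]; omega
      by_cases hex : PySem.Set.contains exact (PySem.Str.join "." (PySem.List.slice labels (some (i : Int)))) = true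
      · -- exact match at i
        simp only [hex, hipos, Bool.true_and, if_true, Bool.true_or]
        have hno : decide (((labels.length : Int) - i) > ((labels.length : Int) - i)) = false := by
          simp only [decide_eq_false_iff_not]; omega
        simp only [hno, Bool.and_false, if_neg (Bool.false_ne_true)]
        rw [pubLoopA_locked labels exact wildcard exceptions k (i + 1) (by omega)
          _ (by rw [show PySem.Str.join "." (PySem.List.slice labels (some (i : Int))) = suf labels i from rfl]
                exact suf_ne_empty labels hall i (by omega)) _ (by push_cast; omega)]
        simp only [suf, excVal]
        push_cast
        rfl
      · simp only [hex, Bool.false_and, if_neg (Bool.false_ne_true), Bool.false_or]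
        by_cases hwc : (decide (i + 1 < labels.length)
            && PySem.Set.contains wildcard (PySem.Str.join "." (PySem.List.slice labels (some ((i : Int) + 1))))) = true
        · -- wildcard match at i
          simp only [hwc, hipos, Bool.true_and, if_true]
          rw [pubLoopA_locked labels exact wildcard exceptions k (i + 1) (by omega)
            _ (by rw [show PySem.Str.join "." (PySem.List.slice labels (some (i : Int))) = suf labels i from rfl]
                  exact suf_ne_empty labels hall i (by omega)) _ (by push_cast; omega)]
          simp only [suf, excVal]
          push_cast
          rfl
        · -- no match at i
          simp only [hwc, Bool.false_eq_true, if_false, Bool.false_and]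
          rw [ih (i + 1) (by omega)]
          simp only [suf, excVal]
          push_cast
          rfl

-- B side: enumerate of the mapped range is the range of pairs
theorem enum_range_map (f : Nat → String) (k i : Nat) :
    PySem.List.enumerate ((List.range' i k).map f) (i : Int) =
      (List.range' i k).map (fun (j : Nat) => ((j : Int), f j)) := by
  induction k generalizing i with
  | zero => rfl
  | succ k ih =>
    rw [List.range'_succ]
    simp only [List.map, PySem.List.enumerate_cons]
    have : ((i : Int) + 1) = (((i + 1 : Nat) : Int)) := by push_cast; ring
    rw [this, ih (i + 1)]

-- find? over the pair range is scanP
theorem find?_range_scanP (f : Nat → String) (q : Int × String → Bool) (k i : Nat) :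
    ((List.range' i k).map (fun (j : Nat) => ((j : Int), f j))).find? q =
      (scanP (fun j => q ((j : Int), f j)) i k).map (fun (j : Nat) => ((j : Int), f j)) := by
  induction k generalizing i with
  | zero => rfl
  | succ k ih =>
    rw [List.range'_succ]
    simp only [List.map, List.find?, scanP]
    by_cases h : q ((i : Int), f i) = true
    · simp [h]
    · simp only [Bool.not_eq_true] at h
      simp [h, ih (i + 1)]

theorem scanP_bound (p : Nat → Bool) (i k j : Nat) (h : scanP p i k = some j) :
    i ≤ j ∧ j < i + k := by
  induction k generalizing i with
  | zero => simp [scanP] at h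
  | succ k ih =>
    simp only [scanP] at h
    split at h
    · cases h; omega
    · have := ih (i + 1) h; omega

theorem pyGet?_map_range (f : Nat → String) (n j : Nat) (hj : j + 1 < n) :
    (PySem.List.pyGet? ((List.range n).map f) ((j : Int) + 1)).getD "" = f (j + 1) := by
  rw [show ((j : Int) + 1) = (((j + 1 : Nat) : Int)) by omega, PySem.List.pyGet?_natCast]
  simp [hj]

-- the two ports agree on a nonempty label list
theorem bridge (labels exact wildcard exceptions : List String)
    (hall : ∀ x ∈ labels, x ≠ "") :
    pubLoopA labels exact wildcard exceptions 0 none 0 =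
      (match (PySem.List.enumerate ((List.range labels.length).map (fun (i : Nat) => PySem.Str.join "." (PySem.List.slice labels (some (i : Int)))))).find? (fun p => PySem.Set.contains exceptions p.2) with
       | some (i, s) =>
           if i + 1 < (labels.length : Int) then (PySem.List.pyGet? ((List.range labels.length).map (fun (i : Nat) => PySem.Str.join "." (PySem.List.slice labels (some (i : Int))))) (i + 1)).getD "" else s
       | none =>
         match (PySem.List.enumerate ((List.range labels.length).map (fun (i : Nat) => PySem.Str.join "." (PySem.List.slice labels (some (i : Int)))))).find?
             (fun p => PySem.Set.contains exact p.2
               || (decide (p.1 + 1 < (labels.length : Int))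
                   && PySem.Set.contains wildcard ((PySem.List.pyGet? ((List.range labels.length).map (fun (i : Nat) => PySem.Str.join "." (PySem.List.slice labels (some (i : Int))))) (p.1 + 1)).getD ""))) with
         | some (_, s) => s
         | none => (PySem.List.pyGet? labels (-1)).getD "") := by
  have hf : (fun (i : Nat) => PySem.Str.join "." (PySem.List.slice labels (some (i : Int)))) = suf labels := rfl
  rw [hf]
  set n := labels.length with hn
  rw [List.range_eq_range']
  have henum := enum_range_map (suf labels) n 0
  push_cast at henum
  rw [henum]
  rw [find?_range_scanP (suf labels) _ n 0, find?_range_scanP (suf labels) _ n 0]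
  rw [pubLoopA_fresh labels exact wildcard exceptions hall n 0 (by omega)]
  cases hscan : scanP (fun j => PySem.Set.contains exceptions (suf labels j)) 0 n with
  | some j =>
    have hj : j < n := by have := (scanP_bound _ 0 n j hscan).2; omega
    simp only [Option.map_some]
    unfold excVal
    by_cases h1 : j + 1 < n
    · rw [if_pos h1, if_pos (show (j : Int) + 1 < (n : Int) by exact_mod_cast by omega)]
      rw [← List.range_eq_range', pyGet?_map_range (suf labels) n j h1]
    · rw [if_neg h1, if_neg (show ¬ ((j : Int) + 1 < (n : Int)) by omega)]
  | none =>
    simp only [Option.map_none]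
    have hcongr : scanP (fun (j : Nat) =>
        PySem.Set.contains exact ((j : Int), suf labels j).2
          || (decide (((j : Int), suf labels j).1 + 1 < (n : Int))
              && PySem.Set.contains wildcard ((PySem.List.pyGet? ((List.range' 0 n).map (suf labels)) (((j : Int), suf labels j).1 + 1)).getD ""))) 0 n
        = scanP (matchP labels exact wildcard) 0 n := by
      apply scanP_congr
      intro j _ hjn
      simp only [matchP, ← hn]
      by_cases h1 : j + 1 < n
      · rw [← List.range_eq_range', pyGet?_map_range (suf labels) n j h1]
        have : decide ((j : Int) + 1 < (n : Int)) = decide (j + 1 < n) := by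
          simp only [decide_eq_decide]; omega
        rw [this]
      · have h2 : decide ((j : Int) + 1 < (n : Int)) = false := by
          simp only [decide_eq_false_iff_not]; omega
        have h3 : decide (j + 1 < n) = false := by
          simp only [decide_eq_false_iff_not]; omega
        rw [h2, h3]
        simp
    rw [hcongr]
    cases hm : scanP (matchP labels exact wildcard) 0 n with
    | some m => simp
    | none => simp

-- ===== VERDICT (by name: the statement is the Claim_ definition above) =====
theorem public_suffix_spec : Claim_equal_public_suffix := by
  intro domain rules _
  show public_suffix domain rules = public_suffix_alt domain rules
  obtain ⟨exact0, wildcard0, exceptions0⟩ := rules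
  simp only [public_suffix, public_suffix_alt]
  by_cases hnil : ((PySem.Str.split? domain ".").getD []).filter (fun p => decide (p ≠ "")) = []
  · rw [if_pos hnil, if_pos hnil]
  · rw [if_neg hnil, if_neg hnil]
    apply bridge
    intro x hx
    have := (List.mem_filter.mp hx).2
    simpa using this
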